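-- pv_equiv track=rewrite | github.com/raksok/resemantica | src/resemantica/epub/rebuild.py | _translated_text_by_parent
-- ===== SOURCE A (Python) =====
-- from typing import Any
--
-- def _translated_text_by_parent(translated_blocks: list[dict[str, Any]]) -> dict[str, str]:
--     grouped: dict[str, list[tuple[int, str]]] = {}
--     for index, block in enumerate(translated_blocks):
--         parent_id = str(block.get("parent_block_id") or block.get("block_id"))
--         text = block.get("final_output")
--         if text is None:
--             text = block.get("restored_text_en")
--         if text is None:
--             text = block.get("output_text_en")
--         segment_order = block.get("segment_order")
--         if segment_order is None:
--             segment_id = str(block.get("segment_id") or "")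
--             if "_seg" in segment_id:
--                 try:
--                     segment_order = int(segment_id.rsplit("_seg", 1)[1])
--                 except ValueError:
--                     segment_order = index
--             else:
--                 segment_order = index
--         grouped.setdefault(parent_id, []).append((int(segment_order), str(text or "")))
--     return {
--         parent_id: "".join(text for _, text in sorted(parts, key=lambda item: item[0]))
--         for parent_id, parts in grouped.items()
--     }
-- ===== SOURCE B (Python) =====
-- def _extract(block, index):
--     parent_id = str(block.get("parent_block_id") or block.get("block_id"))
--     text = block.get("final_output")
--     if text is None:
--         text = block.get("restored_text_en")
--     if text is None:
--         text = block.get("output_text_en")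
--     segment_order = block.get("segment_order")
--     if segment_order is None:
--         segment_id = str(block.get("segment_id") or "")
--         if "_seg" in segment_id:
--             try:
--                 segment_order = int(segment_id.rsplit("_seg", 1)[1])
--             except ValueError:
--                 segment_order = index
--         else:
--             segment_order = index
--     return parent_id, int(segment_order), str(text or "")
--
--
-- def _translated_text_by_parent(translated_blocks):
--     pieces = {}
--     triples = []
--     for index, block in enumerate(translated_blocks):
--         parent_id, order, text = _extract(block, index)
--         pieces.setdefault(parent_id, [])
--         triples.append((parent_id, order, text))
--     triples.sort(key=lambda t: t[1])
--     for parent_id, _, text in triples: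
--         pieces[parent_id].append(text)
--     return {p: "".join(ts) for p, ts in pieces.items()}
-- ===== Notes on version B (the rewrite author's own statement) =====
-- stated objective: alternative
-- what changed: A groups (order, text) pairs per parent and then stably sorts each group; B builds one flat list of (parent, order, text) triples, stably sorts it once by order alone, and then distributes texts to parents pre-registered in first-occurrence order.
import Mathlib
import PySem

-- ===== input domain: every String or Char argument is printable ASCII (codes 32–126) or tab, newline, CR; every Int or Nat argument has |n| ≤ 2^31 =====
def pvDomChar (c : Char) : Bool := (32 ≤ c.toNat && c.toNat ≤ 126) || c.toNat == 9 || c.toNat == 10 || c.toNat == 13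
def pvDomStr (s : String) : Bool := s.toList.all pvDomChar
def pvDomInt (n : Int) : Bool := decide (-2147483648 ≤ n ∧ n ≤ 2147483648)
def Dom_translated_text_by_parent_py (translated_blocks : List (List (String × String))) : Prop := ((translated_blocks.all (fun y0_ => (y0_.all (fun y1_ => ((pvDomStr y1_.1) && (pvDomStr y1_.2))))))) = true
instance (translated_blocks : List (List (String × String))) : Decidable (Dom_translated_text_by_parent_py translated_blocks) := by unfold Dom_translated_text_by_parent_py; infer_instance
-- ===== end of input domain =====

-- B regroups by a single stable sort of all (parent, order, text) triples instead of per-parent sorts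
-- (objective: alternative decomposition; same cost).


-- ===== PORT A =====
-- Literal transliteration: group (order, text) per parent in an insertion-ordered dict,
-- then sort each group by order and join.  block.get(k) = first-match lookup in the
-- association list.  'int(segment_order)' on a string from the dict is PySem.Int.ofStr?;
-- none there is Python's ValueError, excluded by Pre_ (.getD 0 is never the value used
-- on admitted inputs).  segment_id.rsplit("_seg", 1)[1] is ported by hand as the slice
-- after the LAST occurrence of "_seg" (rfind + 4), exact because '"_seg" in segment_id'
-- holds on that branch.
def translated_text_by_parent_py (translated_blocks : List (List (String × String))) : List (String × String) :=
  let grouped : PySem.Dict String (List (Int × String)) :=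
    (PySem.List.enumerate translated_blocks).foldl (fun d ib =>
      let index := ib.1
      let block := ib.2
      -- parent_id = str(block.get("parent_block_id") or block.get("block_id"))
      let parent_id : String :=
        match List.lookup "parent_block_id" block with
        | some s => if s = "" then (match List.lookup "block_id" block with
                                    | some t => t
                                    | none => "None") else s
        | none => match List.lookup "block_id" block with
                  | some t => t
                  | none => "None"
      let text := List.lookup "final_output" block
      let text := match text with
                  | none => List.lookup "restored_text_en" block
                  | some s => some s
      let text := match text with
                  | none => List.lookup "output_text_en" block
                  | some s => some s
      let segment_order : Option Int :=
        match List.lookup "segment_order" block with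
        | some s => PySem.Int.ofStr? s      -- int(s): none = ValueError, excluded by Pre_
        | none =>
          let segment_id := (List.lookup "segment_id" block).getD ""
          if PySem.Str.isIn "_seg" segment_id then
            match PySem.Int.ofStr? (PySem.Str.slice segment_id
                    (some (PySem.Str.rfind segment_id "_seg" + 4)) none) with
            | some n => some n
            | none => some index
          else some index
      -- grouped.setdefault(parent_id, []).append((int(segment_order), str(text or "")))
      d.modify parent_id [] (· ++ [(segment_order.getD 0, text.getD "")])) PySem.Dict.empty
  grouped.items.map (fun pt =>
    (pt.1, PySem.Str.join "" ((PySem.List.sorted pt.2 (fun item => item.1) false).map (fun it => it.2))))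

-- ===== PORT B =====
-- B-side helpers: the shared field-extraction chain of Source B's _extract.
def bParent (block : List (String × String)) : String :=
  match List.lookup "parent_block_id" block with
  | some s => if s = "" then (match List.lookup "block_id" block with
                              | some t => t
                              | none => "None") else s
  | none => match List.lookup "block_id" block with
            | some t => t
            | none => "None"

def bText (block : List (String × String)) : String :=
  let text := List.lookup "final_output" block
  let text := match text with
              | none => List.lookup "restored_text_en" block
              | some s => some s
  let text := match text with
              | none => List.lookup "output_text_en" block
              | some s => some s
  text.getD ""

def bOrder (block : List (String × String)) (index : Int) : Option Int :=
  match List.lookup "segment_order" block with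
  | some s => PySem.Int.ofStr? s      -- int(s): none = ValueError, excluded by Pre_
  | none =>
    let segment_id := (List.lookup "segment_id" block).getD ""
    if PySem.Str.isIn "_seg" segment_id then
      match PySem.Int.ofStr? (PySem.Str.slice segment_id
              (some (PySem.Str.rfind segment_id "_seg" + 4)) none) with
      | some n => some n
      | none => some index
    else some index

def bExtract (block : List (String × String)) (index : Int) : String × Int × String :=
  (bParent block, (bOrder block index).getD 0, bText block)

-- One pass building (parent → []) registrations plus the flat triple list, ONE stable
-- sort of all triples by order, then one pass appending each text to its parent
-- (pieces[parent].append(text): the key is always present, so Dict.modify is exact).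
def translated_text_by_parent_py_alt (translated_blocks : List (List (String × String))) : List (String × String) :=
  let init := (PySem.List.enumerate translated_blocks).foldl
    (fun (acc : PySem.Dict String (List String) × List (String × Int × String)) ib =>
      (acc.1.setdefault (bExtract ib.2 ib.1).1 [], acc.2 ++ [bExtract ib.2 ib.1]))
    (PySem.Dict.empty, [])
  let pieces := (PySem.List.sorted init.2 (fun t => t.2.1) false).foldl
    (fun d t => d.modify t.1 [] (· ++ [t.2.2])) init.1
  pieces.items.map (fun pt => (pt.1, PySem.Str.join "" pt.2))

-- ===== PRECONDITION & SPEC =====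
-- Pre_ excludes exactly the inputs where A raises ValueError: a block whose
-- "segment_order" entry is not int()-parseable.
def Pre_translated_text_by_parent_py (translated_blocks : List (List (String × String))) : Prop :=
  ∀ block ∈ translated_blocks, ∀ s, List.lookup "segment_order" block = some s →
    (PySem.Int.ofStr? s).isSome = true

instance (translated_blocks : List (List (String × String))) : Decidable (Pre_translated_text_by_parent_py translated_blocks) := by
  unfold Pre_translated_text_by_parent_py; infer_instance

def pvWitness_translated_text_by_parent_py : (List (List (String × String))) :=
  [[("block_id", "b1"), ("final_output", "Hello "), ("segment_order", "2")],
   [("parent_block_id", "b1"), ("output_text_en", "world"), ("segment_id", "b1_seg1")]]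

def Spec_translated_text_by_parent_py (translated_blocks : List (List (String × String))) (out : List (String × String)) : Prop := out = translated_text_by_parent_py_alt translated_blocks
instance (translated_blocks : List (List (String × String))) (out : List (String × String)) : Decidable (Spec_translated_text_by_parent_py translated_blocks out) := by unfold Spec_translated_text_by_parent_py; infer_instance

-- ===== CLAIM (what is proved, stated in full; the proofs are below) =====
def Claim_equal_translated_text_by_parent_py : Prop := ∀ (translated_blocks : List (List (String × String))), Dom_translated_text_by_parent_py translated_blocks → Pre_translated_text_by_parent_py translated_blocks → Spec_translated_text_by_parent_py translated_blocks (translated_text_by_parent_py translated_blocks)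

-- ===== LEMMAS AND PROOFS =====


theorem filter_insertBy_neg {α : Type} (p : α → Bool) (bef : α → α → Bool) (x : α) (acc : List α)
    (hx : p x = false) : (PySem.List.insertBy bef x acc).filter p = acc.filter p := by
  induction acc with
  | nil => simp [PySem.List.insertBy, hx]
  | cons a as ih =>
    by_cases h : bef x a = true
    · simp [PySem.List.insertBy, h, hx]
    · simp only [PySem.List.insertBy, h, Bool.false_eq_true, if_false, List.filter_cons]
      rw [show (PySem.List.insertBy bef x as).filter p = as.filter p from ih]

theorem insertBy_cons_of_head {α : Type} (bef : α → α → Bool) (x : α) (ys : List α)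
    (h : ∀ y, ys.head? = some y → bef x y = true) :
    PySem.List.insertBy bef x ys = x :: ys := by
  cases ys with
  | nil => rfl
  | cons y ys' => simp [PySem.List.insertBy, h y rfl]

theorem filter_insertBy_pos {α κ : Type} [LinearOrder κ] (p : α → Bool) (key : α → κ) (x : α) (acc : List α)
    (hacc : acc.Pairwise (fun a b => key a ≤ key b)) (hx : p x = true) :
    (PySem.List.insertBy (fun a b => decide (key a < key b)) x acc).filter p
      = PySem.List.insertBy (fun a b => decide (key a < key b)) x (acc.filter p) := by
  induction acc with
  | nil => simp [PySem.List.insertBy, hx]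
  | cons a as ih =>
    rcases List.pairwise_cons.mp hacc with ⟨ha, has⟩
    by_cases h : key x < key a
    · -- inserted at the front
      simp only [PySem.List.insertBy, decide_eq_true_eq, if_pos h]
      by_cases hpa : p a = true
      · simp [hx, hpa, PySem.List.insertBy, h]
      · simp only [List.filter_cons, hx, hpa, if_pos, Bool.false_eq_true, if_false]
        rw [insertBy_cons_of_head]
        intro y hy
        have hmem : y ∈ as := by
          cases hf : as.filter p with
          | nil => rw [hf] at hy; cases hy
          | cons z zs =>
            rw [hf] at hy
            have : y ∈ as.filter p := by rw [hf]; simp_all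
            exact List.mem_of_mem_filter this
        simp only [decide_eq_true_eq]
        exact lt_of_lt_of_le h (ha y hmem)
    · simp only [PySem.List.insertBy, decide_eq_true_eq, if_neg h]
      by_cases hpa : p a = true
      · simp only [List.filter_cons, hpa, if_pos]
        rw [ih has]
        simp [PySem.List.insertBy, h]
      · simp only [List.filter_cons, hpa, Bool.false_eq_true, if_false]
        exact ih has

theorem sorted_append_singleton {α κ : Type} [LT κ] [DecidableLT κ] (xs : List α) (x : α) (key : α → κ) :
    PySem.List.sorted (xs ++ [x]) key false
      = PySem.List.insertBy (fun a b => decide (key a < key b)) x (PySem.List.sorted xs key false) := by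
  rw [PySem.List.sorted_eq_foldl_insertBy, PySem.List.sorted_eq_foldl_insertBy, List.foldl_append]
  rfl

theorem filter_sorted {α κ : Type} [LinearOrder κ] (p : α → Bool) (key : α → κ) (xs : List α) :
    (PySem.List.sorted xs key false).filter p = PySem.List.sorted (xs.filter p) key false := by
  induction xs using List.reverseRecOn with
  | nil => rfl
  | append_singleton ys y ih =>
    rw [sorted_append_singleton, List.filter_append]
    by_cases hy : p y = true
    · rw [filter_insertBy_pos p key y _ (PySem.List.sorted_pairwise ys key) hy, ih]
      simp [hy, sorted_append_singleton]
    · rw [filter_insertBy_neg p _ y _ (by simpa using hy), ih]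
      simp [hy]

theorem map_insertBy {α β κ : Type} [LT κ] [DecidableLT κ] (f : α → β) (key : β → κ) (x : α) (ys : List α) :
    (PySem.List.insertBy (fun a b => decide (key (f a) < key (f b))) x ys).map f
      = PySem.List.insertBy (fun a b => decide (key a < key b)) (f x) (ys.map f) := by
  induction ys with
  | nil => rfl
  | cons a as ih =>
    by_cases h : key (f x) < key (f a)
    · simp [PySem.List.insertBy, h]
    · simp [PySem.List.insertBy, h, ih]

theorem map_sorted {α β κ : Type} [LT κ] [DecidableLT κ] (f : α → β) (key : β → κ) (xs : List α) :
    (PySem.List.sorted xs (fun x => key (f x)) false).map f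
      = PySem.List.sorted (xs.map f) key false := by
  induction xs using List.reverseRecOn with
  | nil => rfl
  | append_singleton ys y ih =>
    rw [sorted_append_singleton, map_insertBy, ih, List.map_append, List.map_singleton,
        sorted_append_singleton]

theorem getD_foldl_setdefault_nil {κ ν : Type} [BEq κ] [LawfulBEq κ] (l : List κ)
    (d : PySem.Dict κ (List ν)) (c : κ) (hd : d.getD c [] = []) :
    (l.foldl (fun d k => d.setdefault k []) d).getD c [] = [] := by
  induction l generalizing d with
  | nil => exact hd
  | cons k rest ih =>
    simp only [List.foldl_cons]
    apply ih
    by_cases h : k = c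
    · subst h
      rw [PySem.Dict.getD_setdefault_self]
      exact hd
    · rw [PySem.Dict.getD_eq_get?_getD, PySem.Dict.get?_setdefault_of_ne d [] (Ne.symm h),
          ← PySem.Dict.getD_eq_get?_getD]
      exact hd

theorem keys_setdefault_eq_add {κ ν : Type} [BEq κ] [LawfulBEq κ] (d : PySem.Dict κ ν) (k : κ) (v : ν) :
    (d.setdefault k v).keys = PySem.Set.add d.keys k := by
  rw [PySem.Dict.keys_setdefault]
  unfold PySem.Set.add
  by_cases h : k ∈ d.keys
  · rw [if_pos ((PySem.Dict.contains_iff_mem_keys d k).mpr h),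
        if_pos ((PySem.Set.contains_iff d.keys k).mpr h)]
  · rw [if_neg (fun hc => h ((PySem.Dict.contains_iff_mem_keys d k).mp hc)),
        if_neg (fun hc => h ((PySem.Set.contains_iff d.keys k).mp hc))]

theorem keys_foldl_setdefault {κ ν : Type} [BEq κ] [LawfulBEq κ] (l : List κ) (d : PySem.Dict κ (List ν)) :
    (l.foldl (fun d k => d.setdefault k []) d).keys = PySem.Set.update d.keys l := by
  induction l generalizing d with
  | nil => simp [PySem.Set.update]
  | cons k rest ih =>
    simp only [List.foldl_cons]
    rw [ih, keys_setdefault_eq_add d k []]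
    rfl

theorem set_update_eq_self {α : Type} [BEq α] [LawfulBEq α] (s : PySem.Set α) (xs : List α)
    (h : ∀ x ∈ xs, x ∈ s) : PySem.Set.update s xs = s := by
  induction xs generalizing s with
  | nil => exact PySem.Set.update_nil s
  | cons x rest ih =>
    have : PySem.Set.update s (x :: rest) = PySem.Set.update (s.add x) rest := rfl
    rw [this, PySem.Set.add_of_mem (h x (by simp))]
    exact ih s (fun y hy => h y (by simp [hy]))


def pvTrips (tb : List (List (String × String))) : List (String × Int × String) :=
  (PySem.List.enumerate tb).map (fun ib => bExtract ib.2 ib.1)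

theorem a_char (tb : List (List (String × String))) :
    translated_text_by_parent_py tb
      = (PySem.Set.update ([] : PySem.Set String) ((pvTrips tb).map (fun t => t.1))).map
          (fun p => (p, PySem.Str.join ""
            ((PySem.List.sorted (((pvTrips tb).filter (fun t => t.1 == p)).map (fun t => t.2))
              (fun item => item.1) false).map (fun it => it.2)))) := by
  have hfold : (PySem.List.enumerate tb).foldl (fun d ib =>
      d.modify (bExtract ib.2 ib.1).1 [] (· ++ [(bExtract ib.2 ib.1).2])) PySem.Dict.empty
      = (pvTrips tb).foldl (fun d t => d.modify t.1 [] (· ++ [t.2])) PySem.Dict.empty := by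
    rw [pvTrips, List.foldl_map]
  have hkeys : ((pvTrips tb).foldl (fun d t => d.modify t.1 [] (· ++ [t.2])) PySem.Dict.empty).keys
      = PySem.Set.update ([] : PySem.Set String) ((pvTrips tb).map (fun t => t.1)) := by
    rw [PySem.Dict.keys_foldl_modify_key (pvTrips tb) (fun t => t.1) [] (fun _ t => (· ++ [t.2]))]
    rfl
  have hnodup : ((pvTrips tb).foldl (fun d t => d.modify t.1 [] (· ++ [t.2])) PySem.Dict.empty).keys.Nodup := by
    apply PySem.Dict.nodup_keys_foldl_modify_key (pvTrips tb) (fun t => t.1) [] (fun _ t => (· ++ [t.2]))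
    exact PySem.Dict.nodup_keys_empty
  show ((PySem.List.enumerate tb).foldl (fun d ib =>
      d.modify (bExtract ib.2 ib.1).1 [] (· ++ [(bExtract ib.2 ib.1).2])) PySem.Dict.empty).items.map
      (fun pt => (pt.1, PySem.Str.join ""
        ((PySem.List.sorted pt.2 (fun item => item.1) false).map (fun it => it.2)))) = _
  rw [hfold, PySem.Dict.items_eq_map_keys _ hnodup [], hkeys, List.map_map]
  apply List.map_congr_left
  intro p _
  simp only [Function.comp]
  congr 2
  rw [← hkeys] at *
  rw [show ((pvTrips tb).foldl (fun d t => d.modify t.1 [] (· ++ [t.2])) PySem.Dict.empty).getD p []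
      = PySem.Dict.empty.getD p [] ++ ((pvTrips tb).filter (fun t => t.1 == p)).map (fun t => t.2)
    from PySem.Dict.getD_foldl_modify_append (pvTrips tb) PySem.Dict.empty p]
  rfl


theorem b_char (tb : List (List (String × String))) :
    translated_text_by_parent_py_alt tb
      = (PySem.Set.update ([] : PySem.Set String) ((pvTrips tb).map (fun t => t.1))).map
          (fun p => (p, PySem.Str.join ""
            (((PySem.List.sorted (pvTrips tb) (fun t => t.2.1) false).filter (fun t => t.1 == p)).map
              (fun t => t.2.2)))) := by
  have hinit : (PySem.List.enumerate tb).foldl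
      (fun (acc : PySem.Dict String (List String) × List (String × Int × String)) ib =>
        (acc.1.setdefault (bExtract ib.2 ib.1).1 [], acc.2 ++ [bExtract ib.2 ib.1]))
      (PySem.Dict.empty, [])
      = ((PySem.List.enumerate tb).foldl (fun d ib => d.setdefault (bExtract ib.2 ib.1).1 []) PySem.Dict.empty,
         pvTrips tb) := by
    rw [PySem.List.foldl_prod_mk (fun d ib => d.setdefault (bExtract ib.2 ib.1).1 [])
          (fun l ib => l ++ [bExtract ib.2 ib.1]) (PySem.List.enumerate tb) PySem.Dict.empty []]
    rw [PySem.List.foldl_append_singleton_eq_map (fun ib => bExtract ib.2 ib.1) (PySem.List.enumerate tb) []]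
    rfl
  have hd0 : (PySem.List.enumerate tb).foldl (fun d ib => d.setdefault (bExtract ib.2 ib.1).1 [])
        (PySem.Dict.empty : PySem.Dict String (List String))
      = ((pvTrips tb).map (fun t => t.1)).foldl (fun d k => d.setdefault k [])
        (PySem.Dict.empty : PySem.Dict String (List String)) := by
    rw [pvTrips, List.map_map, List.foldl_map]
    rfl
  have hkeys0 : (((pvTrips tb).map (fun t => t.1)).foldl (fun d k => d.setdefault k [])
        (PySem.Dict.empty : PySem.Dict String (List String))).keys
      = PySem.Set.update ([] : PySem.Set String) ((pvTrips tb).map (fun t => t.1)) := by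
    rw [keys_foldl_setdefault]
    rfl
  -- the second fold, over the sorted triples
  have hpfold : ∀ (d : PySem.Dict String (List String)),
      (PySem.List.sorted (pvTrips tb) (fun t => t.2.1) false).foldl
        (fun d t => d.modify t.1 [] (· ++ [t.2.2])) d
      = ((PySem.List.sorted (pvTrips tb) (fun t => t.2.1) false).map (fun t => (t.1, t.2.2))).foldl
        (fun d p => d.modify p.1 [] (· ++ [p.2])) d := by
    intro d
    rw [List.foldl_map]
  have hperm : ∀ x ∈ (PySem.List.sorted (pvTrips tb) (fun t => t.2.1) false), x ∈ pvTrips tb := by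
    intro x hx
    exact (PySem.List.sorted_perm (pvTrips tb) (fun t => t.2.1) false).mem_iff.mp hx
  show ((PySem.List.sorted ((PySem.List.enumerate tb).foldl
      (fun (acc : PySem.Dict String (List String) × List (String × Int × String)) ib =>
        (acc.1.setdefault (bExtract ib.2 ib.1).1 [], acc.2 ++ [bExtract ib.2 ib.1]))
      (PySem.Dict.empty, [])).2 (fun t => t.2.1) false).foldl
      (fun d t => d.modify t.1 [] (· ++ [t.2.2]))
      ((PySem.List.enumerate tb).foldl
      (fun (acc : PySem.Dict String (List String) × List (String × Int × String)) ib =>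
        (acc.1.setdefault (bExtract ib.2 ib.1).1 [], acc.2 ++ [bExtract ib.2 ib.1]))
      (PySem.Dict.empty, [])).1).items.map
      (fun pt => (pt.1, PySem.Str.join "" pt.2)) = _
  rw [hinit]
  simp only [hd0]
  rw [hpfold]
  have hkeysP : ((((PySem.List.sorted (pvTrips tb) (fun t => t.2.1) false).map (fun t => (t.1, t.2.2))).foldl
      (fun d p => d.modify p.1 [] (· ++ [p.2]))
      ((((pvTrips tb).map (fun t => t.1)).foldl (fun d k => d.setdefault k [])
        (PySem.Dict.empty : PySem.Dict String (List String)))))).keys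
      = PySem.Set.update ([] : PySem.Set String) ((pvTrips tb).map (fun t => t.1)) := by
    rw [PySem.Dict.keys_foldl_modify_key
          ((PySem.List.sorted (pvTrips tb) (fun t => t.2.1) false).map (fun t => (t.1, t.2.2)))
          (fun (p : String × String) => p.1) ([] : List String)
          (fun _ (p : String × String) => (· ++ [p.2])), hkeys0, List.map_map]
    apply set_update_eq_self
    intro x hx
    simp only [List.mem_map, Function.comp] at hx
    obtain ⟨t, ht, rfl⟩ := hx
    rw [PySem.Set.mem_update]
    right
    exact List.mem_map_of_mem (hperm t ht)
  have hnodupP : ((((PySem.List.sorted (pvTrips tb) (fun t => t.2.1) false).map (fun t => (t.1, t.2.2))).foldl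
      (fun d p => d.modify p.1 [] (· ++ [p.2]))
      ((((pvTrips tb).map (fun t => t.1)).foldl (fun d k => d.setdefault k [])
        (PySem.Dict.empty : PySem.Dict String (List String)))))).keys.Nodup := by
    apply PySem.Dict.nodup_keys_foldl_modify_key
          ((PySem.List.sorted (pvTrips tb) (fun t => t.2.1) false).map (fun t => (t.1, t.2.2)))
          (fun (p : String × String) => p.1) ([] : List String)
          (fun _ (p : String × String) => (· ++ [p.2]))
    rw [hkeys0]
    exact PySem.Set.nodup_update _ _ List.nodup_nil
  rw [PySem.Dict.items_eq_map_keys _ hnodupP [], hkeysP, List.map_map]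
  apply List.map_congr_left
  intro p _
  simp only [Function.comp]
  congr 2
  rw [PySem.Dict.getD_foldl_modify_append, getD_foldl_setdefault_nil _ _ _ (by rfl),
      List.filter_map, List.map_map]
  rfl

theorem per_parent (T : List (String × Int × String)) (p : String) :
    (PySem.List.sorted ((T.filter (fun t => t.1 == p)).map (fun t => t.2)) (fun item => item.1) false).map (fun it => it.2)
      = ((PySem.List.sorted T (fun t => t.2.1) false).filter (fun t => t.1 == p)).map (fun t => t.2.2) := by
  rw [filter_sorted (fun t => t.1 == p) (fun t => t.2.1) T]
  rw [← map_sorted (fun (t : String × Int × String) => t.2) (fun (it : Int × String) => it.1)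
        (T.filter (fun t => t.1 == p))]
  rw [List.map_map]
  rfl

-- ===== VERDICT (by name: the statement is the Claim_ definition above) =====
theorem translated_text_by_parent_py_spec : Claim_equal_translated_text_by_parent_py := by
  intro tb _ _
  unfold Spec_translated_text_by_parent_py
  rw [a_char, b_char]
  apply List.map_congr_left
  intro p _
  rw [per_parent (pvTrips tb) p]
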